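-- pv_equiv track=rewrite | github.com/jake0403/Algorithm | TOSS/pb_01_2.py | solution
-- ===== SOURCE A (Python) =====
-- from collections import defaultdict
--
-- def solution(name_list):
--     N = len(name_list)
--     compare = defaultdict(int)
--     for name in name_list:
--         compare[name]+=1
--     same = 65
--     for i in range(N-1,-1,-1):
--         if compare[name_list[i]] > 0:
--             compare[name_list[i]]-=1
--             name_list[i]+=chr(same+compare[name_list[i]])
--     return name_list
-- ===== SOURCE B (Python) =====
-- def solution(name_list):
--     seen = {}
--     out = []
--     for name in name_list:
--         k = seen.get(name, 0)
--         seen[name] = k + 1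
--         out.append(name + chr(65 + k))
--     return out
-- ===== Notes on version B (the rewrite author's own statement) =====
-- stated objective: simpler
-- what changed: A counts all names first and then walks the list backwards decrementing counts and mutating in place; B is a single forward pass that appends chr(65 + times-seen-so-far) while building a fresh output list (no counting pass, no reverse walk; note: A mutates its argument in place, B does not - the equivalence is about the return value).
import Mathlib
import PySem

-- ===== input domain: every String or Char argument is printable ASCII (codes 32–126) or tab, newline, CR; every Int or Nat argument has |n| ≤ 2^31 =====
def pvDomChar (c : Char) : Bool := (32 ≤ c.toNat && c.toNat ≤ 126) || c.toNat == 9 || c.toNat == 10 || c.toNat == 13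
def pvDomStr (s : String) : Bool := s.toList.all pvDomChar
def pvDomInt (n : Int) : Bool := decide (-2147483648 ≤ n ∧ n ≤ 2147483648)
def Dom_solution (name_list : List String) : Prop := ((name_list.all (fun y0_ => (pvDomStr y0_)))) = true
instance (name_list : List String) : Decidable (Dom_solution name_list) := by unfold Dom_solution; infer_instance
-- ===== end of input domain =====

-- B replaces A's count-then-reverse-in-place-walk by a single forward pass with a seen-so-far
-- counter, building a fresh list (simpler; A mutates its argument in place, B does not — the
-- equivalence proved here is about the return value only).


-- ===== PORT A =====
-- chr(n) followed by string concatenation, shared primitive of both ports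
def pyChr (n : Int) : String := String.ofList [Char.ofNat n.toNat]

-- the body of A's reverse loop (same = 65)
def aStep (st : PySem.Dict String Int × List String) (i : Int) :
    PySem.Dict String Int × List String :=
  match PySem.List.pyGet? st.2 i with
  | none => st   -- unreachable: i is always a valid index
  | some name =>
    if st.1.getD name 0 > 0 then
      let cmp := st.1.insert name (st.1.getD name 0 - 1)
      (cmp, st.2.set i.toNat (name ++ pyChr (65 + cmp.getD name 0)))
    else st

def solution (name_list : List String) : List String :=
  let N : Int := (name_list.length : Int)
  -- compare = defaultdict(int); for name in name_list: compare[name] += 1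
  let compare : PySem.Dict String Int :=
    name_list.foldl (fun d name => d.modify name 0 (· + 1)) PySem.Dict.empty
  -- for i in range(N-1, -1, -1): …
  let res := (PySem.List.pyRange (N - 1) (-1) (-1)).foldl aStep (compare, name_list)
  res.2

-- ===== PORT B =====
-- the body of B's forward loop
def bStep (st : PySem.Dict String Int × List String) (name : String) :
    PySem.Dict String Int × List String :=
  let k := st.1.getD name 0
  (st.1.insert name (k + 1), st.2 ++ [name ++ pyChr (65 + k)])

def solution_alt (name_list : List String) : List String :=
  -- seen = {}; out = []; for name in name_list: k = seen.get(name, 0); seen[name] = k+1; out.append(name + chr(65+k))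
  (name_list.foldl bStep (PySem.Dict.empty, [])).2

-- ===== PRECONDITION & SPEC =====
def Spec_solution (name_list : List String) (out : List String) : Prop := out = solution_alt name_list
instance (name_list : List String) (out : List String) : Decidable (Spec_solution name_list out) := by unfold Spec_solution; infer_instance

-- ===== CLAIM (what is proved, stated in full; the proofs are below) =====
def Claim_equal_solution : Prop := ∀ (name_list : List String), Dom_solution name_list → Spec_solution name_list (solution name_list)

-- ===== LEMMAS AND PROOFS =====

-- the common characterisation: every name gets chr(65 + its count in the prefix before it)
def tagSpec (pre l : List String) : List String :=
  match l with
  | [] => []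
  | a :: rest => (a ++ pyChr (65 + (pre.count a : Int))) :: tagSpec (pre ++ [a]) rest

theorem tagSpec_append (l : List String) (pre : List String) (a : String) :
    tagSpec pre (l ++ [a]) = tagSpec pre l ++ [a ++ pyChr (65 + ((pre ++ l).count a : Int))] := by
  induction l generalizing pre with
  | nil => simp [tagSpec]
  | cons b rest ih =>
      simp only [List.cons_append, tagSpec, ih (pre ++ [b]), List.append_assoc, List.cons_append,
        List.nil_append]

theorem altLoop (l : List String) (seen : PySem.Dict String Int) (acc pre : List String)
    (h : ∀ x, seen.getD x 0 = (pre.count x : Int)) :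
    (l.foldl bStep (seen, acc)).2 = acc ++ tagSpec pre l := by
  induction l generalizing seen acc pre with
  | nil => simp [tagSpec]
  | cons a rest ih =>
      simp only [List.foldl_cons, tagSpec, bStep]
      rw [h a, ih _ _ (pre ++ [a]) ?_]
      · simp
      · intro x
        rw [PySem.Dict.getD_insert, h x]
        simp only [List.count_append]
        by_cases hx : x = a
        · subst hx; simp
        · simp [hx, Ne.symm hx]

theorem set_append_cons {α : Type} (pre : List α) (b x : α) (suf : List α) :
    (pre ++ b :: suf).set pre.length x = pre ++ x :: suf := by
  induction pre with
  | nil => rfl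
  | cons h t ih => simp [ih]

theorem aLoop (pre : List String) (suf : List String) (cmp : PySem.Dict String Int)
    (h : ∀ x, cmp.getD x 0 = (pre.count x : Int)) :
    ((PySem.List.pyRange ((pre.length : Int) - 1) (-1) (-1)).foldl aStep
      (cmp, pre ++ suf)).2 = tagSpec [] pre ++ suf := by
  induction pre using List.reverseRecOn generalizing suf cmp with
  | nil =>
      rw [PySem.List.pyRange_neg_one_eq_nil (by norm_num)]
      simp [tagSpec]
  | append_singleton pre' a ih =>
      have hlen : ((pre' ++ [a]).length : Int) - 1 = (pre'.length : Int) := by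
        simp
      rw [hlen, PySem.List.pyRange_neg_one_cons (by omega)]
      simp only [List.foldl_cons]
      have hget : PySem.List.pyGet? ((pre' ++ [a]) ++ suf) ((pre'.length : Int)) = some a := by
        rw [List.append_assoc, List.singleton_append]
        exact PySem.List.pyGet?_append_length pre' suf a
      have hcnt : cmp.getD a 0 = ((pre'.count a : Int)) + 1 := by
        rw [h a]; simp [List.count_append]
      have hstep : aStep (cmp, (pre' ++ [a]) ++ suf) ((pre'.length : Int)) =
          (cmp.insert a (cmp.getD a 0 - 1),
           pre' ++ (a ++ pyChr (65 + (cmp.getD a 0 - 1))) :: suf) := by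
        unfold aStep
        rw [hget]
        dsimp only
        rw [if_pos (show cmp.getD a 0 > 0 by rw [hcnt]; positivity)]
        rw [PySem.Dict.getD_insert_self, List.append_assoc, List.singleton_append,
          Int.toNat_natCast, set_append_cons pre' a _ suf]
      rw [hstep, ih ((a ++ pyChr (65 + (cmp.getD a 0 - 1))) :: suf)
            (cmp.insert a (cmp.getD a 0 - 1)) ?_]
      · rw [tagSpec_append]
        have : (65 : Int) + (cmp.getD a 0 - 1) = 65 + (((([] : List String) ++ pre').count a : Int)) := by
          rw [hcnt]; simp
        rw [this]
        simp
      · intro x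
        rw [PySem.Dict.getD_insert]
        by_cases hx : x = a
        · subst hx; rw [if_pos rfl, hcnt]; ring
        · rw [if_neg hx, h x]
          simp [List.count_append, Ne.symm hx]

-- ===== VERDICT (by name: the statement is the Claim_ definition above) =====
theorem solution_spec : Claim_equal_solution := by
  intro l _
  unfold Spec_solution solution solution_alt
  have hc : ∀ x, (l.foldl (fun d name => d.modify name 0 (· + 1)) PySem.Dict.empty).getD x 0
      = (l.count x : Int) := by
    intro x
    rw [PySem.Dict.getD_foldl_modify_add_one]
    simp
  have := aLoop l [] _ hc
  rw [List.append_nil] at this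
  simp only [this, List.append_nil]
  rw [altLoop l PySem.Dict.empty [] [] (by simp)]
  simp
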